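-- pv_equiv track=rewrite | github.com/Matryoshkaaaa/codingTest | 프로그래머스/1/12954. x만큼 간격이 있는 n개의 숫자/x만큼 간격이 있는 n개의 숫자.py | solution
-- ===== SOURCE A (Python) =====
-- def solution(x, n):
--     answer = []
--     if x > 0:
--         for i in range(x, x * n + 1, x):
--             answer.append(i)
--     elif x < 0:
--         for i in range(x, x * n - 1, x):
--             answer.append(i)
--     elif x == 0:
--         return [0] * n
--     return answer
-- ===== SOURCE B (Python) =====
-- def solution(x, n):
--     return [x * i for i in range(1, n + 1)]
-- ===== Notes on version B (the rewrite author's own statement) =====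
-- stated objective: simpler
-- what changed: Replaces the three-way sign branch (x>0/x<0/x==0) with signed value-stepping ranges by a single branch-free comprehension multiplying x by the 1-based index.
import Mathlib
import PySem

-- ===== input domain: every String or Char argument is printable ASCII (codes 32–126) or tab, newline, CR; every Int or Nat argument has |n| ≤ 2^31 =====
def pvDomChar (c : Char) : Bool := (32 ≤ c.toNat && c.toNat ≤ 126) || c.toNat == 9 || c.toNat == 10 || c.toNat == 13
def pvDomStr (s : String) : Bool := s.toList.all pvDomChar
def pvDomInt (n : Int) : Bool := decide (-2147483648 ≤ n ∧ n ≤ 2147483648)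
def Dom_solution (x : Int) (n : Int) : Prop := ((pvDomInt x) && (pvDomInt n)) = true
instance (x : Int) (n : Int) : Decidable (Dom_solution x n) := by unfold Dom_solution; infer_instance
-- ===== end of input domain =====

-- B replaces A's three-way sign branch and signed value-stepping ranges by one
-- branch-free comprehension x*i over i = 1..n (objective: simpler).

-- ===== PORT A =====
def solution (x : Int) (n : Int) : List Int :=
  if x > 0 then
    (PySem.List.pyRange x (x * n + 1) x).foldl (fun acc i => acc ++ [i]) []
  else if x < 0 then
    (PySem.List.pyRange x (x * n - 1) x).foldl (fun acc i => acc ++ [i]) []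
  else if x = 0 then
    List.replicate n.toNat 0      -- [0] * n (n ≤ 0 gives [])
  else
    []

-- ===== PORT B =====
def solution_alt (x : Int) (n : Int) : List Int :=
  (PySem.List.pyRange 1 (n + 1) 1).map (fun i => x * i)

-- ===== PRECONDITION & SPEC =====
def Spec_solution (x : Int) (n : Int) (out : List Int) : Prop := out = solution_alt x n
instance (x : Int) (n : Int) (out : List Int) : Decidable (Spec_solution x n out) := by unfold Spec_solution; infer_instance

-- ===== CLAIM (what is proved, stated in full; the proofs are below) =====
def Claim_equal_solution : Prop := ∀ (x : Int) (n : Int), Dom_solution x n → Spec_solution x n (solution x n)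

-- ===== LEMMAS AND PROOFS =====

-- B in closed form: x·(1+k) over k < n.toNat
theorem solution_alt_eq (x n : Int) :
    solution_alt x n = (List.range n.toNat).map (fun k : Nat => x * (1 + (k : Int))) := by
  unfold solution_alt
  rw [PySem.List.pyRange_one]
  have h : (n + 1 - 1).toNat = n.toNat := by omega
  rw [h, List.map_map]
  rfl

theorem foldl_append_id (l : List Int) :
    l.foldl (fun acc i => acc ++ [i]) [] = l := by
  simpa using PySem.List.foldl_append_singleton_eq_map (fun i : Int => i) l []

theorem solution_spec' (x n : Int) : solution x n = solution_alt x n := by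
  rw [solution_alt_eq]
  unfold solution
  rcases lt_trichotomy x 0 with hx | hx | hx
  · -- x < 0
    rw [if_neg (by omega), if_pos hx, foldl_append_id]
    simp only [PySem.List.pyRange]
    rw [if_neg (by omega : x ≠ 0)]
    simp only [if_neg (by omega : ¬ 0 < x)]
    by_cases hn : 1 ≤ n
    · have hlt : x * n - 1 < x := by nlinarith
      rw [if_pos hlt]
      have h1 : x - (x * n - 1) + -x - 1 = -x * n := by ring
      rw [h1, Int.mul_ediv_cancel_left n (by omega : -x ≠ 0)]
      exact List.map_congr_left (fun k _ => by ring)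
    · have hge : ¬ x * n - 1 < x := by nlinarith
      rw [if_neg hge]
      have : n.toNat = 0 := by omega
      simp [this]
  · -- x = 0
    subst hx
    rw [if_neg (by omega), if_neg (by omega), if_pos rfl]
    rw [List.map_congr_left (fun k _ => by ring : ∀ k ∈ List.range n.toNat, 0 * (1 + (k : Int)) = 0)]
    simp [List.map_const']
  · -- x > 0
    rw [if_pos hx, foldl_append_id]
    simp only [PySem.List.pyRange]
    rw [if_neg (by omega : x ≠ 0)]
    simp only [if_pos hx]
    by_cases hn : 1 ≤ n
    · have hlt : x < x * n + 1 := by nlinarith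
      rw [if_pos hlt]
      have h1 : x * n + 1 - x + x - 1 = x * n := by ring
      rw [h1, Int.mul_ediv_cancel_left n (by omega : x ≠ 0)]
      exact List.map_congr_left (fun k _ => by ring)
    · have hge : ¬ x < x * n + 1 := by nlinarith
      rw [if_neg hge]
      have : n.toNat = 0 := by omega
      simp [this]

-- ===== VERDICT (by name: the statement is the Claim_ definition above) =====
theorem solution_spec : Claim_equal_solution := by
  intro x n _
  unfold Spec_solution
  exact solution_spec' x n
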